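-- pv_equiv track=rewrite | github.com/NikhilSharma972/translatesharetribe | first.py | build_value
-- ===== SOURCE A (Python) =====
-- def build_value(v):
--     st = ""
--     wordss = v.split(" ")
--     for word in wordss:
--         if '%{' in word:
--             st = st + "@@@@@@" + " "
--         else:
--             st = st + word + " "
--     st = st.replace('"',r"'")
--     return '"' + st + '"'
-- ===== SOURCE B (Python) =====
-- def build_value(v):
--     # One streaming pass over the characters (no split/join): a tiny state
--     # machine tracks the current token, whether it contains '%{', and replaces
--     # '"' with "'" on the fly.
--     out = []
--     tok = []
--     has = False
--     prev = ''
--     for ch in v + ' ':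
--         if ch == ' ':
--             out.append('@@@@@@' if has else ''.join(tok))
--             out.append(' ')
--             tok = []
--             has = False
--             prev = ''
--         else:
--             if prev == '%' and ch == '{':
--                 has = True
--             tok.append("'" if ch == '"' else ch)
--             prev = ch
--     return '"' + ''.join(out) + '"'
-- ===== Notes on version B (the rewrite author's own statement) =====
-- stated objective: alternative
-- what changed: Replaces A's split-on-space / word-loop / string-concatenation / whole-string quote replacement with a single streaming state-machine pass over the characters that flushes each token (detecting the '%{' marker via a one-character lookbehind and replacing quotes on the fly).
import Mathlib
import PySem

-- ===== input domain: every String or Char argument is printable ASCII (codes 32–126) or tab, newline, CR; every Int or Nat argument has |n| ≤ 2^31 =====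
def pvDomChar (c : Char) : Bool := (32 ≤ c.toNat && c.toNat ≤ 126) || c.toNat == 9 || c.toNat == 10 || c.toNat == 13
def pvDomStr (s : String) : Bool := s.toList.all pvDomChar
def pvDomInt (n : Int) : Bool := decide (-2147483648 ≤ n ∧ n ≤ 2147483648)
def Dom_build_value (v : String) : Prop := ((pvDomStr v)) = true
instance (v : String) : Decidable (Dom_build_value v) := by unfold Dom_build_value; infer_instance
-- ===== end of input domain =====

-- B replaces A's split/loop/join with a single streaming state-machine pass over the characters (objective: alternative).

-- ===== PORT A =====
def build_value (v : String) : String :=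
  let st : List Char := []
  let wordss := PySem.Chars.splitOn v.toList " ".toList
  let st := wordss.foldl (fun st word =>
    if PySem.Chars.isIn "%{".toList word then st ++ "@@@@@@".toList ++ " ".toList
    else st ++ word ++ " ".toList) st
  let st := PySem.Chars.replace st "\"".toList "'".toList
  String.ofList ("\"".toList ++ st ++ "\"".toList)

-- ===== PORT B =====
def pvStep (st : List Char × List Char × Bool × List Char) (ch : Char) :
    List Char × List Char × Bool × List Char :=
  let (out, tok, has, prev) := st
  if ch = ' ' then
    (out ++ (if has then "@@@@@@".toList else tok) ++ [' '], [], false, [])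
  else
    let has := if prev = ['%'] ∧ ch = '{' then true else has
    (out, tok ++ [if ch = '"' then '\'' else ch], has, [ch])

def build_value_alt (v : String) : String :=
  let fin := (v.toList ++ [' ']).foldl pvStep ([], [], false, [])
  String.ofList ("\"".toList ++ fin.1 ++ "\"".toList)

-- ===== PRECONDITION & SPEC =====
def Spec_build_value (v : String) (out : String) : Prop := out = build_value_alt v
instance (v : String) (out : String) : Decidable (Spec_build_value v out) := by unfold Spec_build_value; infer_instance

-- ===== CLAIM (what is proved, stated in full; the proofs are below) =====
def Claim_equal_build_value : Prop := ∀ (v : String), Dom_build_value v → Spec_build_value v (build_value v)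

-- ===== LEMMAS AND PROOFS =====

/-- quote replacement, per character -/
def pvQ (c : Char) : Char := if c = '"' then '\'' else c

/-- Python's `s.split(" ")` as a plain structural recursion -/
def pvSplit : List Char → List (List Char)
  | [] => [[]]
  | c :: cs =>
    if c = ' ' then [] :: pvSplit cs
    else match pvSplit cs with
      | [] => [[c]]
      | w :: ws => (c :: w) :: ws

/-- the emitted piece for one word -/
def pvPiece (w : List Char) : List Char :=
  if PySem.Chars.isIn ['%', '{'] w then "@@@@@@ ".toList else w.map pvQ ++ [' ']

/-- the `prev` register B keeps for a raw token prefix p -/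
def pvLast (p : List Char) : List Char :=
  match p.getLast? with
  | none => []
  | some c => [c]

lemma pv_modifyHead_id {α : Type} (l : List α) : List.modifyHead (fun x => x) l = l := by
  cases l <;> rfl

lemma pvSplit_ne_nil (cs : List Char) : pvSplit cs ≠ [] := by
  cases cs with
  | nil => simp [pvSplit]
  | cons c cs =>
    simp only [pvSplit]
    split
    · simp
    · cases h : pvSplit cs <;> simp

lemma pv_go_eq : ∀ (cs : List Char) (fuel : Nat) (cur : List Char) (acc : List (List Char)), cs.length < fuel →
    PySem.Chars.splitOn.go [' '] fuel cs cur acc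
      = acc.reverse ++ (pvSplit cs).modifyHead (cur.reverse ++ ·) := by
  intro cs
  induction cs with
  | nil =>
    intro fuel cur acc h
    cases fuel with
    | zero => omega
    | succ f =>
      rw [PySem.Chars.splitOn.go] <;> simp [pvSplit]
  | cons c cs ih =>
    intro fuel cur acc h
    cases fuel with
    | zero => simp at h
    | succ f =>
      by_cases hc : c = ' '
      · subst hc
        rw [show PySem.Chars.splitOn.go [' '] (f+1) (' ' :: cs) cur acc
              = PySem.Chars.splitOn.go [' '] f cs [] (cur.reverse :: acc) by
            rw [PySem.Chars.splitOn.go]; simp [List.isPrefixOf]]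
        rw [ih f [] (cur.reverse :: acc) (by simp at h; omega)]
        rcases h' : pvSplit cs with _ | ⟨w, ws⟩
        · exact absurd h' (pvSplit_ne_nil cs)
        · simp [pvSplit, h']
      · rw [show PySem.Chars.splitOn.go [' '] (f+1) (c :: cs) cur acc
              = PySem.Chars.splitOn.go [' '] f cs (c :: cur) acc by
            rw [PySem.Chars.splitOn.go]; simp [List.isPrefixOf, Ne.symm hc]]
        rw [ih f (c :: cur) acc (by simp at h; omega)]
        simp only [pvSplit, if_neg hc]
        rcases h' : pvSplit cs with _ | ⟨w, ws⟩
        · exact absurd h' (pvSplit_ne_nil cs)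
        · simp

lemma pv_splitOn_eq (cs : List Char) :
    PySem.Chars.splitOn cs [' '] = pvSplit cs := by
  unfold PySem.Chars.splitOn
  rw [pv_go_eq cs (cs.length + 1) [] [] (by omega)]
  simp only [List.reverse_nil, List.nil_append]
  exact pv_modifyHead_id _

lemma pv_repgo_eq : ∀ (cs : List Char) (fuel : Nat) (acc : List Char), cs.length ≤ fuel →
    PySem.Chars.replace.go ['"'] ['\''] fuel cs acc = acc.reverse ++ cs.map pvQ := by
  intro cs
  induction cs with
  | nil =>
    intro fuel acc h
    cases fuel with
    | zero => rw [PySem.Chars.replace.go]; simp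
    | succ f => rw [PySem.Chars.replace.go] <;> simp
  | cons c cs ih =>
    intro fuel acc h
    cases fuel with
    | zero => simp at h
    | succ f =>
      by_cases hc : c = '"'
      · subst hc
        rw [show PySem.Chars.replace.go ['"'] ['\''] (f+1) ('"' :: cs) acc
              = PySem.Chars.replace.go ['"'] ['\''] f cs ('\'' :: acc) by
            rw [PySem.Chars.replace.go]; simp [List.isPrefixOf]]
        rw [ih f ('\'' :: acc) (by simp at h; omega)]
        simp [pvQ]
      · rw [show PySem.Chars.replace.go ['"'] ['\''] (f+1) (c :: cs) acc
              = PySem.Chars.replace.go ['"'] ['\''] f cs (c :: acc) by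
            rw [PySem.Chars.replace.go]; simp [List.isPrefixOf, Ne.symm hc]]
        rw [ih f (c :: acc) (by simp at h; omega)]
        simp [pvQ, hc]

lemma pv_replace_eq (cs : List Char) :
    PySem.Chars.replace cs ['"'] ['\''] = cs.map pvQ := by
  unfold PySem.Chars.replace
  rw [if_neg (by simp)]
  rw [pv_repgo_eq cs cs.length [] (le_refl _)]
  simp

lemma pv_last_eq (l : List Char) : pvLast l = ['%'] ↔ l.getLast? = some '%' := by
  unfold pvLast
  rcases l.getLast? <;> simp

lemma pv_infix_snoc (l : List Char) (c : Char) :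
    ['%', '{'] <:+: (l ++ [c]) ↔ (l.getLast? = some '%' ∧ c = '{') ∨ ['%', '{'] <:+: l := by
  constructor
  · rintro ⟨s, t, hst⟩
    rcases t.eq_nil_or_concat with rfl | ⟨t', d, rfl⟩
    · left
      have h : l ++ [c] = (s ++ ['%']) ++ ['{'] := by
        rw [← hst]; simp
      simp only [← List.concat_eq_append] at h
      have h2 := List.concat_inj.mp h
      refine ⟨?_, h2.2⟩
      rw [h2.1]; simp [List.concat_eq_append]
    · right
      have h : l ++ [c] = (s ++ ['%', '{'] ++ t') ++ [d] := by
        rw [← hst]; simp [List.concat_eq_append]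
      simp only [← List.concat_eq_append] at h
      have h2 := List.concat_inj.mp h
      exact ⟨s, t', by rw [h2.1]⟩
  · rintro (⟨h1, rfl⟩ | h)
    · rcases l.eq_nil_or_concat with rfl | ⟨l', d, rfl⟩
      · simp at h1
      · simp at h1
        subst h1
        exact ⟨l', [], by simp [List.concat_eq_append]⟩
    · exact h.trans (List.prefix_append l [c]).isInfix

/-- containment of the two-character pattern under snoc -/
lemma pv_isIn_snoc (l : List Char) (c : Char) :
    PySem.Chars.isIn ['%', '{'] (l ++ [c])
      = (decide (pvLast l = ['%'] ∧ c = '{') || PySem.Chars.isIn ['%', '{'] l) := by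
  rw [Bool.eq_iff_iff]
  simp only [Bool.or_eq_true, decide_eq_true_eq, PySem.Chars.isIn_iff_infix, pv_infix_snoc,
    pv_last_eq]

lemma pv_last_snoc (p : List Char) (c : Char) : pvLast (p ++ [c]) = [c] := by
  simp [pvLast]

lemma pv_step_space (out tok : List Char) (has : Bool) (prev : List Char) :
    pvStep (out, tok, has, prev) ' '
      = (out ++ (if has then "@@@@@@".toList else tok) ++ [' '], [], false, []) := by
  simp [pvStep]

lemma pv_step_char (out tok : List Char) (has : Bool) (prev : List Char) (c : Char) (hc : c ≠ ' ') :
    pvStep (out, tok, has, prev) c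
      = (out, tok ++ [if c = '"' then '\'' else c],
         if prev = ['%'] ∧ c = '{' then true else has, [c]) := by
  simp [pvStep, hc]

lemma pv_piece_flush (p : List Char) :
    (if PySem.Chars.isIn ['%', '{'] p then "@@@@@@".toList else p.map pvQ) ++ [' ']
      = pvPiece p := by
  unfold pvPiece
  split
  · decide
  · rfl

/-- the streaming fold, word-level characterisation -/
lemma pv_fold_eq : ∀ (cs out p : List Char),
    ((cs ++ [' ']).foldl pvStep
        (out, p.map pvQ, PySem.Chars.isIn ['%', '{'] p, pvLast p)).1
      = out ++ ((pvSplit cs).modifyHead (p ++ ·)).flatMap pvPiece := by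
  intro cs
  induction cs with
  | nil =>
    intro out p
    rw [List.nil_append, List.foldl_cons, pv_step_space, List.foldl_nil]
    simp only [pvSplit, List.modifyHead, List.append_nil, List.flatMap_cons, List.flatMap_nil]
    rw [List.append_assoc, pv_piece_flush]
  | cons c cs ih =>
    intro out p
    by_cases hc : c = ' '
    · subst hc
      rw [List.cons_append, List.foldl_cons, pv_step_space]
      have h := ih (out ++ (if PySem.Chars.isIn ['%', '{'] p then "@@@@@@".toList
                      else List.map pvQ p) ++ [' ']) []
      rw [show List.map pvQ [] = ([] : List Char) from rfl,
          show pvLast [] = ([] : List Char) from rfl,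
          show PySem.Chars.isIn ['%', '{'] [] = false by decide] at h
      simp only [List.nil_append] at h
      rw [pv_modifyHead_id] at h
      rw [h]
      rw [show pvSplit (' ' :: cs) = [] :: pvSplit cs by simp [pvSplit]]
      simp only [List.modifyHead, List.flatMap_cons, List.append_nil, List.append_assoc]
      rw [← List.append_assoc _ [' '], pv_piece_flush]
    · have hstep : pvStep (out, p.map pvQ, PySem.Chars.isIn ['%', '{'] p, pvLast p) c
          = (out, (p ++ [c]).map pvQ, PySem.Chars.isIn ['%', '{'] (p ++ [c]), pvLast (p ++ [c])) := by
        rw [pv_step_char _ _ _ _ _ hc, pv_isIn_snoc, pv_last_snoc]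
        simp only [List.map_append, List.map_cons, List.map_nil]
        refine congrArg _ (congrArg₂ _ (congrArg _ (congrArg _ rfl)) ?_)
        refine congrArg₂ _ ?_ rfl
        split <;> simp_all
      rw [List.cons_append, List.foldl_cons, hstep, ih]
      congr 1
      rcases h' : pvSplit cs with _ | ⟨w, ws⟩
      · exact absurd h' (pvSplit_ne_nil cs)
      · rw [show pvSplit (c :: cs) = (c :: w) :: ws by simp [pvSplit, hc, h']]
        simp [List.append_assoc]

lemma pv_map_piece (w : List Char) :
    (if PySem.Chars.isIn ['%', '{'] w then "@@@@@@".toList ++ [' '] else w ++ [' ']).map pvQ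
      = pvPiece w := by
  unfold pvPiece
  split
  · decide
  · simp [pvQ]

/-- A's fold appends one piece per word -/
lemma pv_foldA (ws : List (List Char)) : ∀ st : List Char,
    ws.foldl (fun st word =>
      if PySem.Chars.isIn ['%', '{'] word then st ++ "@@@@@@".toList ++ [' ']
      else st ++ word ++ [' ']) st
    = st ++ ws.flatMap (fun w =>
        if PySem.Chars.isIn ['%', '{'] w then "@@@@@@".toList ++ [' '] else w ++ [' ']) := by
  induction ws with
  | nil => intro st; simp
  | cons w ws ih =>
    intro st
    simp only [List.foldl_cons, List.flatMap_cons, ih]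
    split <;> simp [List.append_assoc]

-- ===== VERDICT (by name: the statement is the Claim_ definition above) =====
theorem build_value_spec : Claim_equal_build_value := by
  intro v _
  unfold Spec_build_value build_value build_value_alt
  simp only [show ("%{".toList : List Char) = ['%', '{'] from rfl,
             show (" ".toList : List Char) = [' '] from rfl,
             show ("\"".toList : List Char) = ['"'] from rfl,
             show ("'".toList : List Char) = ['\''] from rfl]
  rw [pv_splitOn_eq, pv_foldA, pv_replace_eq]
  simp only [List.nil_append, List.map_flatMap]
  have hB : ((v.toList ++ [' ']).foldl pvStep ([], [], false, [])).1
      = (pvSplit v.toList).flatMap pvPiece := by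
    have h := pv_fold_eq v.toList [] []
    rw [show List.map pvQ [] = ([] : List Char) from rfl,
        show pvLast [] = ([] : List Char) from rfl,
        show PySem.Chars.isIn ['%', '{'] [] = false by decide] at h
    rw [h]
    rcases h' : pvSplit v.toList with _ | ⟨w, ws⟩
    · exact absurd h' (pvSplit_ne_nil v.toList)
    · simp
  rw [hB]
  have hfun : (fun x => List.map pvQ
      (if PySem.Chars.isIn ['%', '{'] x = true then "@@@@@@".toList ++ [' '] else x ++ [' ']))
      = pvPiece := funext pv_map_piece
  rw [hfun]
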